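-- pv_equiv track=rewrite | github.com/josephpark0511/ppp2025 | hw10/weather_data.py | rainfalls_sum
-- ===== SOURCE A (Python) =====
-- def rainfalls_sum(rainfalls):
--     count = 0
--     count_list = []
--     for rain in rainfalls:
--         if rain > 0:
--             count += rain
--         else:
--             if count > 0:
--                 count_list.append(count)
--                 count = 0
--     if count > 0:
--         count_list.append(count)
--     return max(count_list)
-- ===== SOURCE B (Python) =====
-- def rainfalls_sum(rainfalls):
--     # Prefix sums + boundary indices: a run between two consecutive non-positive
--     # positions sums to a difference of prefix sums; take max of the positive ones.
--     pre = [0]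
--     s = 0
--     for x in rainfalls:
--         s += x
--         pre.append(s)
--     bounds = [-1] + [i for i, x in enumerate(rainfalls) if x <= 0] + [len(rainfalls)]
--     sums = [pre[b] - pre[a + 1] for a, b in zip(bounds, bounds[1:])]
--     return max(v for v in sums if v > 0)
-- ===== Notes on version B (the rewrite author's own statement) =====
-- stated objective: alternative
-- what changed: Replaces A's running accumulator/flush state machine by staged passes over different data: build a prefix-sum array and the list of non-positive boundary indices, obtain each run's sum as a difference of prefix sums at consecutive boundaries, and take the max of the positive ones.
import Mathlib
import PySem

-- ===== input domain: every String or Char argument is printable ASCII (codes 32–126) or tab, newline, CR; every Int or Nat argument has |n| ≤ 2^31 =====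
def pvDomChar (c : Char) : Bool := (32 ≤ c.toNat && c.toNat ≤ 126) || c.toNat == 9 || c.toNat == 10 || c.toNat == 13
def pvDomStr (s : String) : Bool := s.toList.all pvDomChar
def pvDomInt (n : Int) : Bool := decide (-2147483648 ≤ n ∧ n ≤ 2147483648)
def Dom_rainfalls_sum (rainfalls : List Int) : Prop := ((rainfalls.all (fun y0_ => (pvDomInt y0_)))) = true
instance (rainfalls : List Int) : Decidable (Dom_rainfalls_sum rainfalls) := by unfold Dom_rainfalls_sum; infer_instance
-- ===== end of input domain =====

-- B replaces A's running accumulator/flush state machine by staged passes over different data: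
-- a prefix-sum array plus the list of non-positive boundary indices; each run's sum is a
-- difference of prefix sums at consecutive boundaries, and the max of the positive ones is returned.

-- ===== PORT A =====
-- A: fold keeping (count, count_list), flush the final run, then max(count_list).
-- max(count_list) raises ValueError when count_list is empty — Pre_ excludes exactly that
-- (no positive entry); the port returns (max?).getD 0 there, outside the claim.
def rainfalls_sum (rainfalls : List Int) : Int :=
  let st := rainfalls.foldl
    (fun (s : Int × List Int) rain =>
      if rain > 0 then (s.1 + rain, s.2)
      else if s.1 > 0 then (0, s.2 ++ [s.1]) else (s.1, s.2))
    (0, [])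
  let count_list := if st.1 > 0 then st.2 ++ [st.1] else st.2
  (PySem.List.max? count_list (fun y => y)).getD 0

-- ===== PORT B =====
-- B: pre = prefix sums (pre[k] = sum of first k entries), bounds = [-1] ++ indices of
-- non-positive entries ++ [len]; each run sum is pre[b] - pre[a+1] for consecutive bounds;
-- max over the positive ones.  Every index pre[·] touches is provably in range (pvPreGet
-- below), so the .getD 0 after pyGet? is never taken; max over the empty candidate list
-- is Python's ValueError — outside Pre_, the port returns (max?).getD 0 there.
def rainfalls_sum_alt (rainfalls : List Int) : Int :=
  let st := rainfalls.foldl (fun (st : List Int × Int) x => (st.1 ++ [st.2 + x], st.2 + x)) ([0], 0)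
  let pre := st.1
  let bounds : List Int :=
    [-1] ++ (PySem.List.enumerate rainfalls).filterMap
        (fun ix => if ix.2 ≤ 0 then some ix.1 else none)
      ++ [(rainfalls.length : Int)]
  let sums := (bounds.zip bounds.tail).map (fun ab =>
      (PySem.List.pyGet? pre ab.2).getD 0 - (PySem.List.pyGet? pre (ab.1 + 1)).getD 0)
  (PySem.List.max? (sums.filter (fun v => decide (0 < v))) (fun y => y)).getD 0

-- ===== PRECONDITION & SPEC =====
-- A (and B) raise ValueError (max of an empty sequence) when no entry is positive; Pre_ excludes exactly those inputs.
def Pre_rainfalls_sum (rainfalls : List Int) : Prop := ∃ x ∈ rainfalls, x > 0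
instance (rainfalls : List Int) : Decidable (Pre_rainfalls_sum rainfalls) := by unfold Pre_rainfalls_sum; infer_instance
def pvWitness_rainfalls_sum : List Int := [0, 3, 2, -1, 4]

def Spec_rainfalls_sum (rainfalls : List Int) (out : Int) : Prop := out = rainfalls_sum_alt rainfalls
instance (rainfalls : List Int) (out : Int) : Decidable (Spec_rainfalls_sum rainfalls out) := by unfold Spec_rainfalls_sum; infer_instance

-- ===== CLAIM (what is proved, stated in full; the proofs are below) =====
def Claim_equal_rainfalls_sum : Prop := ∀ (rainfalls : List Int), Dom_rainfalls_sum rainfalls → Pre_rainfalls_sum rainfalls → Spec_rainfalls_sum rainfalls (rainfalls_sum rainfalls)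

-- ===== LEMMAS AND PROOFS =====

-- run sums of l given an already-accumulated positive-run value c
def pvRuns (c : Int) : List Int → List Int
  | [] => if c > 0 then [c] else []
  | x :: xs => if x > 0 then pvRuns (c + x) xs
               else if c > 0 then c :: pvRuns 0 xs else pvRuns c xs

-- A's fold + final flush computes acc ++ pvRuns c l
theorem pvA_char (l : List Int) : ∀ (c : Int) (acc : List Int),
    (if (l.foldl
        (fun (s : Int × List Int) rain =>
          if rain > 0 then (s.1 + rain, s.2)
          else if s.1 > 0 then (0, s.2 ++ [s.1]) else (s.1, s.2)) (c, acc)).1 > 0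
     then (l.foldl
        (fun (s : Int × List Int) rain =>
          if rain > 0 then (s.1 + rain, s.2)
          else if s.1 > 0 then (0, s.2 ++ [s.1]) else (s.1, s.2)) (c, acc)).2 ++
          [(l.foldl
        (fun (s : Int × List Int) rain =>
          if rain > 0 then (s.1 + rain, s.2)
          else if s.1 > 0 then (0, s.2 ++ [s.1]) else (s.1, s.2)) (c, acc)).1]
     else (l.foldl
        (fun (s : Int × List Int) rain =>
          if rain > 0 then (s.1 + rain, s.2)
          else if s.1 > 0 then (0, s.2 ++ [s.1]) else (s.1, s.2)) (c, acc)).2)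
    = acc ++ pvRuns c l := by
  induction l with
  | nil =>
    intro c acc
    simp only [List.foldl_nil, pvRuns]
    split_ifs <;> simp
  | cons x xs ih =>
    intro c acc
    simp only [List.foldl_cons]
    by_cases h1 : x > 0
    · simp only [if_pos h1, pvRuns]
      exact ih (c + x) acc
    · by_cases h2 : c > 0
      · simp only [if_neg h1, if_pos h2, pvRuns]
        rw [ih 0 (acc ++ [c])]
        simp
      · simp only [if_neg h1, if_neg h2, pvRuns]
        exact ih c acc

-- ---- B-side abstractions: prefix sums, cut indices, bounds, run sums ----

def pvPref (s : Int) : List Int → List Int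
  | [] => []
  | x :: xs => (s + x) :: pvPref (s + x) xs

theorem pvFold_pref (l : List Int) : ∀ (p : List Int) (s : Int),
    l.foldl (fun (st : List Int × Int) x => (st.1 ++ [st.2 + x], st.2 + x)) (p, s)
      = (p ++ pvPref s l, s + l.sum) := by
  induction l with
  | nil => intro p s; simp [pvPref]
  | cons x xs ih =>
    intro p s
    simp only [List.foldl_cons, pvPref, ih, List.sum_cons]
    simp [List.append_assoc, add_assoc]

theorem pvPrefGet (l : List Int) : ∀ (s : Int) (k : Nat), k ≤ l.length →
    (s :: pvPref s l)[k]? = some (s + (l.take k).sum) := by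
  induction l with
  | nil =>
    intro s k hk
    have hk0 : k = 0 := Nat.le_zero.mp (by simpa using hk)
    subst hk0
    simp [pvPref]
  | cons x xs ih =>
    intro s k hk
    cases k with
    | zero => simp
    | succ k =>
      have := ih (s + x) k (by simpa using hk)
      simp only [pvPref, List.getElem?_cons_succ]
      rw [this]
      simp [add_assoc]

def pvT (l : List Int) (j : Int) : Int := (l.take j.toNat).sum

theorem pvPreGet (l : List Int) (j : Int) (h0 : 0 ≤ j) (h1 : j ≤ (l.length : Int)) :
    (PySem.List.pyGet? (0 :: pvPref 0 l) j).getD 0 = pvT l j := by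
  have hj : j = ((j.toNat : Nat) : Int) := (Int.toNat_of_nonneg h0).symm
  rw [hj, PySem.List.pyGet?_natCast, pvPrefGet l 0 j.toNat (by omega)]
  unfold pvT
  rw [Int.toNat_natCast]
  simp

def pvCutsFrom (s : Int) (l : List Int) : List Int :=
  (PySem.List.enumerate l s).filterMap (fun ix => if ix.2 ≤ 0 then some ix.1 else none)

theorem pvCuts_cons (s : Int) (x : Int) (l : List Int) :
    pvCutsFrom s (x :: l) = (if x ≤ 0 then [s] else []) ++ pvCutsFrom (s + 1) l := by
  simp only [pvCutsFrom, PySem.List.enumerate_cons, List.filterMap_cons]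
  split_ifs <;> simp

theorem pvCuts_shift (l : List Int) : ∀ (s t : Int),
    pvCutsFrom (s + t) l = (pvCutsFrom s l).map (· + t) := by
  induction l with
  | nil => intro s t; simp [pvCutsFrom, PySem.List.enumerate_nil]
  | cons x xs ih =>
    intro s t
    rw [pvCuts_cons, pvCuts_cons]
    have : s + t + 1 = (s + 1) + t := by ring
    rw [this, ih (s + 1) t, List.map_append]
    split_ifs <;> simp

theorem pvCuts_allpos (l : List Int) : ∀ (s : Int), (∀ x ∈ l, 0 < x) → pvCutsFrom s l = [] := by
  induction l with
  | nil => intro s _; simp [pvCutsFrom, PySem.List.enumerate_nil]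
  | cons x xs ih =>
    intro s h
    rw [pvCuts_cons, ih (s + 1) (fun y hy => h y (List.mem_cons_of_mem _ hy))]
    have : ¬ x ≤ 0 := by have := h x (by simp : x ∈ x :: xs) ; omega
    simp [this]

theorem pvCuts_split (a : List Int) : ∀ (s z : Int) (r : List Int),
    (∀ x ∈ a, 0 < x) → z ≤ 0 →
    pvCutsFrom s (a ++ z :: r) = (s + a.length) :: pvCutsFrom (s + a.length + 1) r := by
  induction a with
  | nil => intro s z r _ hz; simp [pvCuts_cons, hz]
  | cons x a ih =>
    intro s z r ha hz
    have hx : ¬ x ≤ 0 := by have := ha x (by simp); omega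
    rw [List.cons_append, pvCuts_cons]
    rw [ih (s + 1) z r (fun y hy => ha y (List.mem_cons_of_mem _ hy)) hz]
    have h1 : s + 1 + (a.length : Int) = s + ((a.length + 1 : Nat) : Int) := by push_cast; ring
    have h2 : s + 1 + (a.length : Int) + 1 = s + ((a.length + 1 : Nat) : Int) + 1 := by push_cast; ring
    simp [hx, List.length_cons, h1]

theorem pvCuts_mem (l : List Int) : ∀ (s : Int) (c : Int), c ∈ pvCutsFrom s l →
    s ≤ c ∧ c < s + l.length := by
  induction l with
  | nil => intro s c hc; simp [pvCutsFrom, PySem.List.enumerate_nil] at hc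
  | cons x xs ih =>
    intro s c hc
    rw [pvCuts_cons] at hc
    rcases List.mem_append.mp hc with h | h
    · split_ifs at h <;> simp at h
      subst h
      simp only [List.length_cons]
      push_cast
      omega
    · have := ih (s + 1) c h
      simp only [List.length_cons]
      push_cast
      omega

def pvBounds (l : List Int) : List Int := -1 :: (pvCutsFrom 0 l ++ [(l.length : Int)])

def pvSums (l : List Int) : List Int :=
  ((pvBounds l).zip (pvBounds l).tail).map (fun ab => pvT l ab.2 - pvT l (ab.1 + 1))

-- first component of a zip-with-tail pair is never the last element
theorem pvZipFst : ∀ (u : List Int) (p : Int × Int), p ∈ u.zip u.tail → p.1 ∈ u.dropLast := by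
  intro u
  induction u with
  | nil => intro p hp; simp at hp
  | cons x u ih =>
    intro p hp
    cases u with
    | nil => simp at hp
    | cons y t =>
      simp only [List.tail_cons, List.zip_cons_cons] at hp
      rcases List.mem_cons.mp hp with h | h
      · subst h; simp
      · have : p ∈ (y :: t).zip (y :: t).tail := by simpa using h
        have := ih p this
        simp only [List.dropLast_cons₂]
        exact List.mem_cons_of_mem _ this

-- port B's sums list equals the abstract pvSums
theorem pvB_sums (l : List Int) :
    rainfalls_sum_alt l
      = (PySem.List.max? ((pvSums l).filter (fun v => decide (0 < v))) (fun y => y)).getD 0 := by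
  unfold rainfalls_sum_alt
  rw [pvFold_pref]
  have hb : [(-1 : Int)] ++ (PySem.List.enumerate l).filterMap
      (fun ix => if ix.2 ≤ 0 then some ix.1 else none) ++ [(l.length : Int)] = pvBounds l := by
    simp [pvBounds, pvCutsFrom]
  simp only [hb]
  unfold pvSums
  congr 2
  congr 1
  apply List.map_congr_left
  intro ab hab
  have h2 : ab.2 ∈ (pvBounds l).tail := by
    obtain ⟨a, b⟩ := ab
    exact (List.of_mem_zip hab).2
  have h1 : ab.1 ∈ (pvBounds l).dropLast := by
    obtain ⟨a, b⟩ := ab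
    exact pvZipFst _ _ hab
  have hdl : (pvBounds l).dropLast = -1 :: pvCutsFrom 0 l := by
    have : pvBounds l = (-1 :: pvCutsFrom 0 l) ++ [(l.length : Int)] := by simp [pvBounds]
    rw [this, List.dropLast_concat]
  rw [hdl] at h1
  have hf2 : 0 ≤ ab.2 ∧ ab.2 ≤ (l.length : Int) := by
    simp only [pvBounds, List.tail_cons] at h2
    rcases List.mem_append.mp h2 with h | h
    · have := pvCuts_mem l 0 ab.2 h; omega
    · simp at h; omega
  have hf1 : 0 ≤ ab.1 + 1 ∧ ab.1 + 1 ≤ (l.length : Int) := by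
    rcases List.mem_cons.mp h1 with h | h
    · rw [h]
      constructor
      · omega
      · simp
    · have := pvCuts_mem l 0 ab.1 h; omega
  rw [show ([0] ++ pvPref 0 l) = 0 :: pvPref 0 l from rfl,
      pvPreGet l ab.2 hf2.1 hf2.2, pvPreGet l (ab.1 + 1) hf1.1 hf1.2]

theorem pvRuns_allpos (l : List Int) : ∀ (c : Int), (∀ x ∈ l, 0 < x) → 0 ≤ c →
    pvRuns c l = if 0 < c + l.sum then [c + l.sum] else [] := by
  induction l with
  | nil => intro c _ _; simp [pvRuns]
  | cons x xs ih =>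
    intro c h hc
    have hx : 0 < x := h x (by simp)
    simp only [pvRuns, if_pos (show x > 0 from hx)]
    rw [ih (c + x) (fun y hy => h y (List.mem_cons_of_mem _ hy)) (by omega)]
    simp [add_assoc]

theorem pvRuns_prefix (a : List Int) : ∀ (c z : Int) (r : List Int),
    (∀ x ∈ a, 0 < x) → 0 ≤ c → z ≤ 0 →
    pvRuns c (a ++ z :: r)
      = if 0 < c + a.sum then (c + a.sum) :: pvRuns 0 r else pvRuns 0 r := by
  induction a with
  | nil =>
    intro c z r _ hc hz
    simp only [List.nil_append, pvRuns, if_neg (show ¬ z > 0 by omega), List.sum_nil, add_zero]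
    split_ifs with h
    · rfl
    · have : c = 0 := by omega
      rw [this]
  | cons x a ih =>
    intro c z r ha hc hz
    have hx : 0 < x := ha x (by simp)
    simp only [List.cons_append, pvRuns, if_pos (show x > 0 from hx)]
    rw [ih (c + x) z r (fun y hy => ha y (List.mem_cons_of_mem _ hy)) (by omega) hz]
    simp [add_assoc]

-- shifting an index past the positive prefix a and the cut z
theorem pvT_shift (a : List Int) (z : Int) (r : List Int) (j : Int) (hj : 0 ≤ j) :
    pvT (a ++ z :: r) (j + ((a.length : Int) + 1)) = a.sum + z + pvT r j := by
  unfold pvT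
  have h1 : (j + ((a.length : Int) + 1)).toNat = a.length + (j.toNat + 1) := by omega
  rw [h1, List.take_append, List.take_of_length_le (by omega : a.length ≤ a.length + (j.toNat + 1))]
  have h2 : a.length + (j.toNat + 1) - a.length = j.toNat + 1 := by omega
  rw [h2]
  simp [add_assoc]

-- main: B's filtered run sums are exactly the run sums of A's state machine
theorem pvSums_runs (n : Nat) : ∀ (l : List Int), l.length ≤ n →
    (pvSums l).filter (fun v => decide (0 < v)) = pvRuns 0 l := by
  induction n with
  | zero =>
    intro l hl
    rw [List.length_eq_zero_iff.mp (Nat.le_zero.mp hl)]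
    decide
  | succ n ih =>
    intro l hl
    by_cases hd : l.dropWhile (fun y => decide (0 < y)) = []
    · -- all entries positive
      have hall : ∀ x ∈ l, 0 < x := by
        intro x hx
        have htw : l.takeWhile (fun y => decide (0 < y)) = l := by
          have h2 := List.takeWhile_append_dropWhile (p := fun y => decide (0 < y)) (l := l)
          rw [hd] at h2; simpa using h2
        have hx' : x ∈ l.takeWhile (fun y => decide (0 < y)) := by rw [htw]; exact hx
        have h3 := List.mem_takeWhile_imp hx'
        simpa using h3
      have hcuts : pvCutsFrom 0 l = [] := pvCuts_allpos l 0 hall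
      have hsums : pvSums l = [l.sum] := by
        simp only [pvSums, pvBounds, hcuts, List.nil_append, List.tail_cons,
          List.zip_cons_cons, List.zip_nil_right, List.map_cons, List.map_nil]
        simp [pvT]
      rw [hsums, pvRuns_allpos l 0 hall (le_refl 0)]
      simp only [zero_add]
      by_cases h : 0 < l.sum <;> simp [h]
    · -- l = a ++ z :: r : positive prefix a, first non-positive entry z
      obtain ⟨z, r, hzr⟩ : ∃ z r, l.dropWhile (fun y => decide (0 < y)) = z :: r := by
        cases h : l.dropWhile (fun y => decide (0 < y)) with
        | nil => exact absurd h hd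
        | cons z r => exact ⟨z, r, rfl⟩
      set a := l.takeWhile (fun y => decide (0 < y)) with hadef
      have hl' : l = a ++ z :: r := by
        rw [hadef, ← hzr]; exact (List.takeWhile_append_dropWhile).symm
      have ha : ∀ x ∈ a, 0 < x := by
        intro x hx
        have := List.mem_takeWhile_imp hx
        simpa using this
      have hz : z ≤ 0 := by
        have hne : l.dropWhile (fun y => decide (0 < y)) ≠ [] := by rw [hzr]; simp
        have h3 := List.head_dropWhile_not (fun y => decide (0 < y)) hne
        have h4 : (l.dropWhile (fun y => decide (0 < y))).head? = some z := by rw [hzr]; rfl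
        have h5 := List.head?_eq_some_head hne
        rw [h4] at h5
        rw [← Option.some.inj h5] at h3
        simp at h3
        omega
      have hrlen : r.length ≤ n := by
        have : l.length = a.length + (r.length + 1) := by rw [hl']; simp
        omega
      have hcuts : pvCutsFrom 0 l
          = (a.length : Int) :: (pvCutsFrom 0 r).map (· + ((a.length : Int) + 1)) := by
        rw [hl', pvCuts_split a 0 z r ha hz]
        have h0 : (0 : Int) + (a.length : Int) + 1 = 0 + ((a.length : Int) + 1) := by ring
        rw [h0, pvCuts_shift r 0 ((a.length : Int) + 1)]
        simp
      have hlen' : (l.length : Int) = (r.length : Int) + ((a.length : Int) + 1) := by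
        rw [hl']; simp; ring
      have hbl : pvBounds l = -1 :: (pvBounds r).map (· + ((a.length : Int) + 1)) := by
        simp only [pvBounds, hcuts, List.map_cons, List.map_append, List.map_nil, List.cons_append]
        rw [hlen']
        norm_num
      have hzip : (pvBounds l).zip (pvBounds l).tail
          = (-1, (a.length : Int)) ::
              ((pvBounds r).zip (pvBounds r).tail).map
                (Prod.map (· + ((a.length : Int) + 1)) (· + ((a.length : Int) + 1))) := by
        rw [hbl]
        simp only [List.tail_cons]
        conv_lhs => rw [show pvBounds r = -1 :: (pvCutsFrom 0 r ++ [(r.length : Int)]) from rfl]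
        simp only [List.map_cons, List.zip_cons_cons]
        congr 1
        · norm_num
        · have hcons : ((-1 : Int) + ((a.length : Int) + 1)) ::
              (pvCutsFrom 0 r ++ [(r.length : Int)]).map (· + ((a.length : Int) + 1))
              = (pvBounds r).map (· + ((a.length : Int) + 1)) := by
            conv_rhs => rw [show pvBounds r = -1 :: (pvCutsFrom 0 r ++ [(r.length : Int)]) from rfl]
            simp
          rw [hcons, show (pvCutsFrom 0 r ++ [(r.length : Int)]) = (pvBounds r).tail from rfl,
            List.zip_map]
      have hsums : pvSums l = a.sum :: pvSums r := by
        unfold pvSums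
        rw [hzip]
        simp only [List.map_cons]
        congr 1
        · -- head: pvT l (a.length) - pvT l 0 = a.sum
          have ht0 : pvT l 0 = 0 := by
            simp [pvT]
          have hti : pvT l (a.length : Int) = a.sum := by
            unfold pvT
            rw [hl']
            simp
          norm_num [ht0, hti]
        · rw [List.map_map]
          apply List.map_congr_left
          intro ab hab
          have h2 : ab.2 ∈ (pvBounds r).tail := by
            obtain ⟨u, v⟩ := ab
            exact (List.of_mem_zip hab).2
          have h1 : ab.1 ∈ (pvBounds r).dropLast := by
            obtain ⟨u, v⟩ := ab
            exact pvZipFst _ _ hab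
          have hdl : (pvBounds r).dropLast = -1 :: pvCutsFrom 0 r := by
            have : pvBounds r = (-1 :: pvCutsFrom 0 r) ++ [(r.length : Int)] := by simp [pvBounds]
            rw [this, List.dropLast_concat]
          rw [hdl] at h1
          have hb2 : 0 ≤ ab.2 := by
            simp only [pvBounds, List.tail_cons] at h2
            rcases List.mem_append.mp h2 with h | h
            · have := pvCuts_mem r 0 ab.2 h; omega
            · simp at h; omega
          have hb1 : 0 ≤ ab.1 + 1 := by
            rcases List.mem_cons.mp h1 with h | h
            · omega
            · have := pvCuts_mem r 0 ab.1 h; omega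
          simp only [Function.comp, Prod.map]
          rw [hl']
          have e2 := pvT_shift a z r ab.2 hb2
          have e1 := pvT_shift a z r (ab.1 + 1) hb1
          have g1 : ab.1 + ((a.length : Int) + 1) + 1 = ab.1 + 1 + ((a.length : Int) + 1) := by ring
          rw [g1, e2, e1]
          ring
      rw [hsums, List.filter_cons]
      rw [ih r hrlen]
      rw [hl', pvRuns_prefix a 0 z r ha (le_refl 0) hz]
      simp only [zero_add]
      by_cases hs : 0 < a.sum <;> simp [hs]

-- A = B
theorem pv_eq (l : List Int) : rainfalls_sum l = rainfalls_sum_alt l := by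
  have hA : rainfalls_sum l = (PySem.List.max? (pvRuns 0 l) (fun y => y)).getD 0 := by
    simp only [rainfalls_sum]
    rw [pvA_char l 0 []]
    simp
  rw [hA, pvB_sums l, pvSums_runs l.length l (le_refl _)]

-- ===== VERDICT (by name: the statement is the Claim_ definition above) =====
theorem rainfalls_sum_spec : Claim_equal_rainfalls_sum := by
  intro l _ _
  unfold Spec_rainfalls_sum
  exact pv_eq l
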